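-- pv_equiv track=rewrite | github.com/zhuofan777/MySTC | mystc_m1.py | closeNums
-- ===== SOURCE A (Python) =====
-- def closeNums(keyList, key, threshold):
--     cnt = 0
--     cnt += keyList.count(key)
--     for i in range(1, threshold):
--         a = key + i
--         b = key - i
--         cnt += keyList.count(a)
--         cnt += keyList.count(b)
--     return cnt
-- ===== SOURCE B (Python) =====
-- def closeNums(keyList, key, threshold):
--     # single pass: count elements within distance < threshold of key (key itself always counts)
--     cnt = 0
--     for x in keyList:
--         if x == key or abs(x - key) < threshold:
--             cnt += 1
--     return cnt
-- ===== Notes on version B (the rewrite author's own statement) =====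
-- stated objective: faster
-- what changed: Replaces the loop over range(1, threshold) with threshold-proportional repeated list.count scans by a single pass over keyList testing abs(x-key) < threshold (with x == key always counted).
import Mathlib
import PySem

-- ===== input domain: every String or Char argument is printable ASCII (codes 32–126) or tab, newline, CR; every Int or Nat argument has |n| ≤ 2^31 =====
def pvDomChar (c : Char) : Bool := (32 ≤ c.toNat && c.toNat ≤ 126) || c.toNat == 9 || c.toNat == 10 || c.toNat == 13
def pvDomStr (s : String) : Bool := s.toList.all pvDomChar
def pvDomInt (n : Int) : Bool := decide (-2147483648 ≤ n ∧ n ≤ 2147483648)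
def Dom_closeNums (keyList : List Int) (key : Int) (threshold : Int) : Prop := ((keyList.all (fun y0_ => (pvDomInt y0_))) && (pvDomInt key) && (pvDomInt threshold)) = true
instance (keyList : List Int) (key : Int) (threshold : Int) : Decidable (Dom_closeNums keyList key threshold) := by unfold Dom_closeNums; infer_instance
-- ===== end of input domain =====

-- B replaces A's loop over range(1, threshold) of repeated list.count scans by a single pass
-- over keyList testing x == key or abs(x - key) < threshold (objective: faster, O(n) vs O(n*threshold)).


-- ===== PORT A =====
def closeNums (keyList : List Int) (key : Int) (threshold : Int) : Int :=
  let cnt : Int := 0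
  let cnt := cnt + (PySem.List.count keyList key : Int)
  (PySem.List.pyRange 1 threshold 1).foldl
    (fun cnt i =>
      let a := key + i
      let b := key - i
      let cnt := cnt + (PySem.List.count keyList a : Int)
      cnt + (PySem.List.count keyList b : Int))
    cnt

-- ===== PORT B =====
def closeNums_alt (keyList : List Int) (key : Int) (threshold : Int) : Int :=
  keyList.foldl
    (fun cnt x => if x = key ∨ |x - key| < threshold then cnt + 1 else cnt)
    0

-- ===== PRECONDITION & SPEC =====
def Spec_closeNums (keyList : List Int) (key : Int) (threshold : Int) (out : Int) : Prop := out = closeNums_alt keyList key threshold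
instance (keyList : List Int) (key : Int) (threshold : Int) (out : Int) : Decidable (Spec_closeNums keyList key threshold out) := by unfold Spec_closeNums; infer_instance

-- ===== CLAIM (what is proved, stated in full; the proofs are below) =====
def Claim_equal_closeNums : Prop := ∀ (keyList : List Int) (key : Int) (threshold : Int), Dom_closeNums keyList key threshold → Spec_closeNums keyList key threshold (closeNums keyList key threshold)

-- ===== LEMMAS AND PROOFS =====

-- sum of an equality indicator over a duplicate-free list is a membership indicator
theorem sum_ind_nodup (L : List Int) (hN : L.Nodup) (v : Int) :
    (L.map (fun i => if i = v then (1 : Int) else 0)).sum = if v ∈ L then 1 else 0 := by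
  induction L with
  | nil => simp
  | cons a L ih =>
    rcases List.nodup_cons.mp hN with ⟨ha, hL⟩
    by_cases hav : a = v
    · subst hav
      simp [List.map_cons, ih hL, ha]
    · simp [List.map_cons, ih hL, hav, Ne.symm hav]

-- per-element bookkeeping: the indicator A adds for element x equals B's test indicator
theorem key_sum (x key t : Int) :
    ((if x = key then (1 : Int) else 0) +
      ((PySem.List.pyRange 1 t 1).map
        (fun i => (if key + i = x then (1 : Int) else 0) + (if key - i = x then 1 else 0))).sum)
    = if x = key ∨ |x - key| < t then 1 else 0 := by
  have hmem : ∀ i : Int, i ∈ PySem.List.pyRange 1 t 1 ↔ 1 ≤ i ∧ i < t := fun i =>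
    PySem.List.mem_pyRange_one
  have hnd : (PySem.List.pyRange 1 t 1).Nodup := PySem.List.nodup_pyRange_one 1 t
  have hsplit :
      ((PySem.List.pyRange 1 t 1).map
        (fun i => (if key + i = x then (1 : Int) else 0) + (if key - i = x then 1 else 0))).sum
      = ((PySem.List.pyRange 1 t 1).map (fun i => if i = x - key then (1 : Int) else 0)).sum
        + ((PySem.List.pyRange 1 t 1).map (fun i => if i = key - x then (1 : Int) else 0)).sum := by
    rw [← List.sum_map_add]
    apply congrArg
    apply List.map_congr_left
    intro i _
    split_ifs <;> omega
  rw [hsplit, sum_ind_nodup _ hnd, sum_ind_nodup _ hnd]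
  by_cases hx : x = key
  · subst hx
    simp [hmem]
  · have h1 : (x - key ∈ PySem.List.pyRange 1 t 1) ↔ (1 ≤ x - key ∧ x - key < t) := hmem _
    have h2 : (key - x ∈ PySem.List.pyRange 1 t 1) ↔ (1 ≤ key - x ∧ key - x < t) := hmem _
    simp only [hx, h1, h2, false_or, if_false]
    rcases lt_trichotomy (x - key) 0 with hd | hd | hd
    · simp only [abs_of_neg hd]
      split_ifs <;> omega
    · exact absurd (by omega) hx
    · simp only [abs_of_pos hd]
      split_ifs <;> omega

-- A's result as a closed sum over the range
theorem closeNums_eq_sum (keyList : List Int) (key t : Int) :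
    closeNums keyList key t
      = (PySem.List.count keyList key : Int)
        + ((PySem.List.pyRange 1 t 1).map
            (fun i => (PySem.List.count keyList (key + i) : Int)
              + (PySem.List.count keyList (key - i) : Int))).sum := by
  unfold closeNums
  simp only [zero_add]
  have : ∀ (L : List Int) (c : Int),
      L.foldl (fun cnt i => cnt + (PySem.List.count keyList (key + i) : Int)
        + (PySem.List.count keyList (key - i) : Int)) c
      = c + (L.map (fun i => (PySem.List.count keyList (key + i) : Int)
        + (PySem.List.count keyList (key - i) : Int))).sum := by
    intro L
    induction L with
    | nil => intro c; simp
    | cons a L ih =>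
      intro c
      simp only [List.foldl_cons, List.map_cons, List.sum_cons, ih]
      ring
  exact this _ _

-- B's result as countP
theorem closeNums_alt_eq_countP (keyList : List Int) (key t : Int) :
    closeNums_alt keyList key t
      = (keyList.countP (fun x => decide (x = key ∨ |x - key| < t)) : Int) := by
  unfold closeNums_alt
  have := PySem.List.foldl_ite_add_one (p := fun x => x = key ∨ |x - key| < t)
    (l := keyList) (a := (0 : Int))
  simpa using this

theorem main_eq (keyList : List Int) (key t : Int) :
    closeNums keyList key t = closeNums_alt keyList key t := by
  rw [closeNums_eq_sum, closeNums_alt_eq_countP]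
  induction keyList with
  | nil => simp [PySem.List.count]
  | cons x xs ih =>
    have hc : ∀ v : Int, (PySem.List.count (x :: xs) v : Int)
        = (PySem.List.count xs v : Int) + (if x = v then 1 else 0) := by
      intro v
      by_cases h : x = v
      · subst h; simp [PySem.List.count]
      · simp [PySem.List.count, h]
    rw [hc key]
    have hmap : ((PySem.List.pyRange 1 t 1).map
        (fun i => (PySem.List.count (x :: xs) (key + i) : Int)
          + (PySem.List.count (x :: xs) (key - i) : Int))).sum
      = ((PySem.List.pyRange 1 t 1).map
        (fun i => (PySem.List.count xs (key + i) : Int)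
          + (PySem.List.count xs (key - i) : Int))).sum
        + ((PySem.List.pyRange 1 t 1).map
        (fun i => (if x = key + i then (1 : Int) else 0) + (if x = key - i then 1 else 0))).sum := by
      rw [← List.sum_map_add]
      apply congrArg
      apply List.map_congr_left
      intro i _
      rw [hc (key + i), hc (key - i)]
      ring
    rw [hmap]
    have hcount : (List.countP (fun x => decide (x = key ∨ |x - key| < t)) (x :: xs) : Int)
        = (List.countP (fun y => decide (y = key ∨ |y - key| < t)) xs : Int)
          + (if x = key ∨ |x - key| < t then 1 else 0) := by
      rw [List.countP_cons]
      split_ifs with h <;> simp_all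
    rw [hcount, ← ih]
    have hk := key_sum x key t
    have hflip : ((PySem.List.pyRange 1 t 1).map
        (fun i => (if x = key + i then (1 : Int) else 0) + (if x = key - i then 1 else 0))).sum
      = ((PySem.List.pyRange 1 t 1).map
        (fun i => (if key + i = x then (1 : Int) else 0) + (if key - i = x then 1 else 0))).sum := by
      apply congrArg
      apply List.map_congr_left
      intro i _
      split_ifs <;> omega
    rw [hflip]
    omega

-- ===== VERDICT (by name: the statement is the Claim_ definition above) =====
theorem closeNums_spec : Claim_equal_closeNums := by
  intro keyList key threshold _
  exact main_eq keyList key threshold
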